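-- pv_equiv track=rewrite | github.com/aryanmangal769/Symbolic-Graph-Inference-for-Compound-Scene-Understanding | datasets/preprocess/filter_dataset_subset.py | verbs_per_noun
-- ===== SOURCE A (Python) =====
-- def verbs_per_noun(verbs, nouns):
--     hist = {}
--     for i in range(len(verbs)):
--         verb = verbs[i]
--         noun = nouns[i]
--         if noun not in hist.keys():
--             hist[noun] = {}
--         if verb not in hist[noun]:
--             hist[noun][verb] = 1
--         else:
--             hist[noun][verb] += 1
--     return hist
-- ===== SOURCE B (Python) =====
-- def verbs_per_noun(verbs, nouns):
--     # Pass 1: flat pair-count table {(noun, verb): n}.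
--     counts = {}
--     for i in range(len(verbs)):
--         key = (nouns[i], verbs[i])
--         counts[key] = counts.get(key, 0) + 1
--     # Pass 2: regroup the flat table into the nested histogram.
--     result = {}
--     for (noun, verb), n in counts.items():
--         result.setdefault(noun, {})[verb] = n
--     return result
-- ===== Notes on version B (the rewrite author's own statement) =====
-- stated objective: alternative
-- what changed: B first builds a flat {(noun, verb): count} table in one pass, then regroups it into the nested per-noun histogram in a second pass, instead of A's incremental nested-dict updates.
import Mathlib
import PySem

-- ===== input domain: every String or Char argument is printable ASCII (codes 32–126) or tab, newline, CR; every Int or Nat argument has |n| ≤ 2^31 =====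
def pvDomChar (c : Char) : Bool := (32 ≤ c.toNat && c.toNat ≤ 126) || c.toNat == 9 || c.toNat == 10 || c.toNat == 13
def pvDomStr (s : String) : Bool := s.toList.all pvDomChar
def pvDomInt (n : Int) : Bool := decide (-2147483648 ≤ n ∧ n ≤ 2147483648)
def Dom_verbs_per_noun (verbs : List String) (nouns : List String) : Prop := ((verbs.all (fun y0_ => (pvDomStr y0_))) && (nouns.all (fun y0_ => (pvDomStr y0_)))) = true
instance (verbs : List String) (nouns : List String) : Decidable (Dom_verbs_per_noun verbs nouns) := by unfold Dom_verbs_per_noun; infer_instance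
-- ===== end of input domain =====

-- B builds a flat (noun, verb) pair-count table first and regroups it into the nested
-- histogram in a second pass, instead of A's incremental nested-dict updates (objective: alternative).

-- ===== PORT A =====
def verbs_per_noun (verbs : List String) (nouns : List String) : List (String × List (String × Int)) :=
  let hist : PySem.Dict String (PySem.Dict String Int) :=
    (PySem.List.pyRange 0 (PySem.List.len verbs)).foldl (fun hist i =>
      let verb := PySem.List.pyGetD verbs i ""
      let noun := PySem.List.pyGetD nouns i ""
      let hist := if hist.contains noun then hist else hist.insert noun PySem.Dict.empty
      let inner := hist.getD noun PySem.Dict.empty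
      if inner.contains verb then hist.insert noun (inner.insert verb (inner.getD verb 0 + 1))
      else hist.insert noun (inner.insert verb 1)) PySem.Dict.empty
  hist.items.map (fun p => (p.1, p.2.items))

-- ===== PORT B =====
def verbs_per_noun_alt (verbs : List String) (nouns : List String) : List (String × List (String × Int)) :=
  let counts : PySem.Dict (String × String) Int :=
    (PySem.List.pyRange 0 (PySem.List.len verbs)).foldl (fun d i =>
      let key := (PySem.List.pyGetD nouns i "", PySem.List.pyGetD verbs i "")
      d.insert key (d.getD key 0 + 1)) PySem.Dict.empty
  let result : PySem.Dict String (PySem.Dict String Int) :=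
    counts.items.foldl (fun r q =>
      let r := r.setdefault q.1.1 PySem.Dict.empty
      r.insert q.1.1 ((r.getD q.1.1 PySem.Dict.empty).insert q.1.2 q.2)) PySem.Dict.empty
  result.items.map (fun p => (p.1, p.2.items))

-- ===== PRECONDITION & SPEC =====
-- Pre_ excludes only the inputs where Python A raises IndexError: nouns shorter than verbs.
def Pre_verbs_per_noun (verbs : List String) (nouns : List String) : Prop := verbs.length ≤ nouns.length
instance (verbs : List String) (nouns : List String) : Decidable (Pre_verbs_per_noun verbs nouns) := by unfold Pre_verbs_per_noun; infer_instance
def pvWitness_verbs_per_noun : List String × List String := (["run", "eat", "run"], ["dog", "cat", "dog"])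

def Spec_verbs_per_noun (verbs : List String) (nouns : List String) (out : List (String × List (String × Int))) : Prop := out = verbs_per_noun_alt verbs nouns
instance (verbs : List String) (nouns : List String) (out : List (String × List (String × Int))) : Decidable (Spec_verbs_per_noun verbs nouns out) := by unfold Spec_verbs_per_noun; infer_instance

-- ===== CLAIM (what is proved, stated in full; the proofs are below) =====
def Claim_equal_verbs_per_noun : Prop := ∀ (verbs : List String) (nouns : List String), Dom_verbs_per_noun verbs nouns → Pre_verbs_per_noun verbs nouns → Spec_verbs_per_noun verbs nouns (verbs_per_noun verbs nouns)

-- ===== LEMMAS AND PROOFS =====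

lemma pvPairs (verbs nouns : List String) (h : verbs.length ≤ nouns.length) :
    (PySem.List.pyRange 0 (PySem.List.len verbs)).map
      (fun i => (PySem.List.pyGetD nouns i "", PySem.List.pyGetD verbs i "")) = nouns.zip verbs := by
  apply List.ext_getElem
  · simp [PySem.List.length_pyRange_one, PySem.List.len]
    omega
  · intro k h1 h2
    simp only [List.getElem_map, PySem.List.getElem_pyRange_one, zero_add]
    have hk : k < verbs.length := by
      simpa [PySem.List.length_pyRange_one, PySem.List.len] using h1
    rw [List.getElem_zip]
    rw [Prod.ext_iff]
    constructor <;> rw [PySem.List.pyGetD_natCast] <;> simp [List.getD_eq_getElem?_getD, List.getElem?_eq_getElem, hk, lt_of_lt_of_le hk h]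

lemma pv_map_ofList {α β : Type} [BEq α] [LawfulBEq α] [BEq β] [LawfulBEq β] (f : α → β)
    (hf : Function.Injective f) (l : List α) :
    PySem.Set.ofList (l.map f) = (PySem.Set.ofList l).map f := by
  induction l using List.reverseRecOn with
  | nil => rfl
  | append_singleton l x ih =>
    rw [List.map_append, List.map_singleton, PySem.Set.ofList_append_singleton,
        PySem.Set.ofList_append_singleton, ih]
    by_cases hx : x ∈ PySem.Set.ofList l
    · rw [PySem.Set.add_of_mem hx, PySem.Set.add_of_mem (List.mem_map_of_mem hx)]
    · rw [PySem.Set.add_of_not_mem hx, PySem.Set.add_of_not_mem (by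
        intro hm
        obtain ⟨y, hy, hxy⟩ := List.mem_map.mp hm
        exact hx (hf hxy ▸ hy)), List.map_append, List.map_singleton]

lemma pv_filter_ofList {α : Type} [BEq α] [LawfulBEq α] (p : α → Bool) (l : List α) :
    (PySem.Set.ofList l).filter p = PySem.Set.ofList (l.filter p) := by
  induction l using List.reverseRecOn with
  | nil => rfl
  | append_singleton l x ih =>
    rw [PySem.Set.ofList_append_singleton, List.filter_append, PySem.Set.ofList_append]
    by_cases hx : x ∈ PySem.Set.ofList l
    · rw [PySem.Set.add_of_mem hx]
      by_cases hp : p x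
      · have : x ∈ PySem.Set.ofList (l.filter p) := by
          rw [PySem.Set.mem_ofList]; exact List.mem_filter.mpr ⟨(PySem.Set.mem_ofList _ _).mp hx, hp⟩
        simp [hp, PySem.Set.update, PySem.Set.add_of_mem this, ih]
      · simp at hp; simp [hp, PySem.Set.update, ih]
    · rw [PySem.Set.add_of_not_mem hx, List.filter_append]
      by_cases hp : p x
      · have : x ∉ PySem.Set.ofList (l.filter p) := by
          rw [PySem.Set.mem_ofList]; intro hm; exact hx ((PySem.Set.mem_ofList _ _).mpr (List.mem_filter.mp hm).1)
        simp [hp, PySem.Set.update, PySem.Set.add_of_not_mem this, ih]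
      · simp at hp; simp [hp, PySem.Set.update, ih]

lemma pv_ofList_map_ofList {α β : Type} [BEq α] [LawfulBEq α] [BEq β] [LawfulBEq β] (f : α → β) (l : List α) :
    PySem.Set.ofList ((PySem.Set.ofList l).map f) = PySem.Set.ofList (l.map f) := by
  induction l using List.reverseRecOn with
  | nil => rfl
  | append_singleton l x ih =>
    rw [PySem.Set.ofList_append_singleton, List.map_append, List.map_singleton,
        PySem.Set.ofList_append_singleton, ← ih]
    by_cases hx : x ∈ PySem.Set.ofList l
    · rw [PySem.Set.add_of_mem hx, PySem.Set.add_of_mem (by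
        rw [PySem.Set.mem_ofList]; exact List.mem_map_of_mem hx)]
    · rw [PySem.Set.add_of_not_mem hx, List.map_append, List.map_singleton,
        PySem.Set.ofList_append_singleton]

def pvInner (ps : List (String × String)) (noun : String) : List (String × Int) :=
  (PySem.Set.ofList ((ps.filter (fun q => q.1 == noun)).map (·.2))).map
    (fun verb => (verb, (ps.count (noun, verb) : Int)))

def pvDictOf (ps : List (String × String)) : PySem.Dict String (PySem.Dict String Int) :=
  PySem.Dict.mk ((PySem.Set.ofList (ps.map (·.1))).map (fun noun => (noun, PySem.Dict.mk (pvInner ps noun))))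

lemma pv_keys_dictOf (ps : List (String × String)) :
    (pvDictOf ps).keys = PySem.Set.ofList (ps.map (·.1)) := by
  simp only [pvDictOf, PySem.Dict.keys_mk, List.map_map]
  exact List.map_id' _

lemma pv_contains_dictOf (ps : List (String × String)) (n : String) :
    (pvDictOf ps).contains n = decide (n ∈ ps.map (·.1)) := by
  rw [PySem.Dict.contains_eq_decide_mem_keys, pv_keys_dictOf]
  simp [PySem.Set.mem_ofList]

lemma pv_getD_dictOf (ps : List (String × String)) (n : String) (h : n ∈ ps.map (·.1)) :
    (pvDictOf ps).getD n PySem.Dict.empty = PySem.Dict.mk (pvInner ps n) := by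
  apply PySem.Dict.getD_of_mem_items
  · show (n, PySem.Dict.mk (pvInner ps n)) ∈ (PySem.Set.ofList (ps.map (·.1))).map _
    exact List.mem_map_of_mem ((PySem.Set.mem_ofList _ _).mpr h)
  · rw [pv_keys_dictOf]; exact PySem.Set.nodup_ofList _

lemma pv_filter_fresh (ps : List (String × String)) (n : String) (h : n ∉ ps.map (·.1)) :
    ps.filter (fun q => q.1 == n) = [] := by
  rw [List.filter_eq_nil_iff]
  intro q hq hb
  exact h (List.mem_map.mpr ⟨q, hq, by simpa using hb⟩)

lemma pv_contains_inner (ps : List (String × String)) (n v : String) :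
    (PySem.Dict.mk (pvInner ps n)).contains v
      = decide (v ∈ (ps.filter (fun q => q.1 == n)).map (·.2)) := by
  rw [PySem.Dict.contains_eq_decide_mem_keys, PySem.Dict.keys_mk]
  simp [pvInner, List.map_map, Function.comp, PySem.Set.mem_ofList]

lemma pv_getD_inner (ps : List (String × String)) (n v : String)
    (h : v ∈ (ps.filter (fun q => q.1 == n)).map (·.2)) :
    (PySem.Dict.mk (pvInner ps n)).getD v 0 = (ps.count (n, v) : Int) := by
  apply PySem.Dict.getD_of_mem_items
  · show (v, (ps.count (n, v) : Int)) ∈ pvInner ps n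
    exact List.mem_map_of_mem ((PySem.Set.mem_ofList _ _).mpr h)
  · rw [PySem.Dict.keys_mk]
    have : (pvInner ps n).map (fun x => x.1)
        = PySem.Set.ofList ((ps.filter (fun q => q.1 == n)).map (·.2)) := by
      simp only [pvInner, List.map_map]
      exact List.map_id' _
    rw [this]
    exact PySem.Set.nodup_ofList _

lemma pv_count_zero (ps : List (String × String)) (n v : String)
    (h : v ∉ (ps.filter (fun q => q.1 == n)).map (·.2)) : ps.count (n, v) = 0 := by
  rw [List.count_eq_zero]
  intro hm
  exact h (List.mem_map.mpr ⟨(n, v), List.mem_filter.mpr ⟨hm, by simp⟩, rfl⟩)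

lemma pv_inner_unchanged (ps : List (String × String)) (p : String × String) (n : String)
    (h : n ≠ p.1) : pvInner (ps ++ [p]) n = pvInner ps n := by
  have hf : (ps ++ [p]).filter (fun q => q.1 == n) = ps.filter (fun q => q.1 == n) := by
    rw [List.filter_append]
    simp [List.filter_singleton, Ne.symm h]
  unfold pvInner
  rw [hf]
  apply List.map_congr_left
  intro v _
  have : (ps ++ [p]).count (n, v) = ps.count (n, v) := by
    rw [List.count_append, List.count_singleton]
    have hb : ((n, v) == p) = false := by
      rw [beq_eq_false_iff_ne]; intro he; exact h (by rw [← he])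
    simp [hb]
    intro he; exact h (by rw [he])
  rw [this]

lemma pv_inner_extend_mem (ps : List (String × String)) (noun verb : String)
    (hv : verb ∈ (ps.filter (fun q => q.1 == noun)).map (·.2)) :
    pvInner (ps ++ [(noun, verb)]) noun
      = (pvInner ps noun).map (fun r => if r.1 == verb then (verb, (ps.count (noun, verb) : Int) + 1) else r) := by
  have hf : (ps ++ [(noun, verb)]).filter (fun q => q.1 == noun)
      = ps.filter (fun q => q.1 == noun) ++ [(noun, verb)] := by
    rw [List.filter_append]; simp [List.filter_singleton]
  unfold pvInner
  rw [hf, List.map_append, List.map_singleton, PySem.Set.ofList_append_singleton,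
      PySem.Set.add_of_mem (by rwa [PySem.Set.mem_ofList]), List.map_map]
  apply List.map_congr_left
  intro v hvV
  by_cases hve : v = verb
  · subst hve
    simp only [Function.comp, beq_self_eq_true, if_pos]
    rw [List.count_append, List.count_singleton]
    simp
  · have hb : (v == verb) = false := by simpa using hve
    simp only [Function.comp, hb, if_neg, Bool.false_eq_true, not_false_iff]
    rw [List.count_append, List.count_singleton]
    have hb2 : ((noun, v) == (noun, verb)) = false := by
      rw [beq_eq_false_iff_ne]; simp [hve]
    simp [hb2]
    exact Ne.symm hve

lemma pv_inner_extend_new (ps : List (String × String)) (noun verb : String)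
    (hv : verb ∉ (ps.filter (fun q => q.1 == noun)).map (·.2)) :
    pvInner (ps ++ [(noun, verb)]) noun = pvInner ps noun ++ [(verb, 1)] := by
  have hf : (ps ++ [(noun, verb)]).filter (fun q => q.1 == noun)
      = ps.filter (fun q => q.1 == noun) ++ [(noun, verb)] := by
    rw [List.filter_append]; simp [List.filter_singleton]
  unfold pvInner
  rw [hf, List.map_append, List.map_singleton, PySem.Set.ofList_append_singleton,
      PySem.Set.add_of_not_mem (by rwa [PySem.Set.mem_ofList]), List.map_append, List.map_singleton]
  congr 1
  · apply List.map_congr_left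
    intro v hvV
    have hvmem : v ∈ (ps.filter (fun q => q.1 == noun)).map (·.2) := (PySem.Set.mem_ofList _ _).mp hvV
    have hve : v ≠ verb := by intro he; exact hv (he ▸ hvmem)
    have hb2 : ((noun, v) == (noun, verb)) = false := by
      rw [beq_eq_false_iff_ne]; simp [hve]
    rw [List.count_append, List.count_singleton]
    simp [hb2]
    exact Ne.symm hve
  · rw [List.count_append, List.count_singleton, pv_count_zero ps noun verb hv]
    simp

def pvStepA (hist : PySem.Dict String (PySem.Dict String Int)) (p : String × String) : PySem.Dict String (PySem.Dict String Int) :=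
  let hist := if hist.contains p.1 then hist else hist.insert p.1 PySem.Dict.empty
  let inner := hist.getD p.1 PySem.Dict.empty
  if inner.contains p.2 then hist.insert p.1 (inner.insert p.2 (inner.getD p.2 0 + 1))
  else hist.insert p.1 (inner.insert p.2 1)

lemma pv_inner_nil_of_fresh (ps : List (String × String)) (n : String) (h : n ∉ ps.map (·.1)) :
    pvInner ps n = [] := by
  simp [pvInner, pv_filter_fresh ps n h, PySem.Set.ofList]

lemma pvStepA_dictOf (ps : List (String × String)) (p : String × String) :
    pvStepA (pvDictOf ps) p = pvDictOf (ps ++ [p]) := by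
  obtain ⟨noun, verb⟩ := p
  unfold pvStepA
  simp only [pv_contains_dictOf]
  by_cases hn : noun ∈ ps.map (·.1)
  · simp only [hn, decide_true, if_true]
    rw [pv_getD_dictOf ps noun hn, pv_contains_inner]
    by_cases hv : verb ∈ (ps.filter (fun q => q.1 == noun)).map (·.2)
    · simp only [hv, decide_true, if_true]
      rw [pv_getD_inner ps noun verb hv]
      apply PySem.Dict.ext
      rw [PySem.Dict.items_insert_of_contains _ _ (by rw [pv_contains_dictOf]; simp [hn])]
      show ((PySem.Set.ofList (ps.map (·.1))).map (fun n' => (n', PySem.Dict.mk (pvInner ps n')))).map _ = _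
      show _ = (PySem.Set.ofList ((ps ++ [(noun, verb)]).map (·.1))).map
        (fun n' => (n', PySem.Dict.mk (pvInner (ps ++ [(noun, verb)]) n')))
      rw [List.map_append, List.map_singleton, PySem.Set.ofList_append_singleton,
          PySem.Set.add_of_mem (by rwa [PySem.Set.mem_ofList]), List.map_map]
      apply List.map_congr_left
      intro n' hn'
      by_cases hne : n' = noun
      · subst hne
        simp only [Function.comp, beq_self_eq_true, if_pos]
        refine congrArg _ ?_
        apply PySem.Dict.ext
        rw [PySem.Dict.items_insert_of_contains _ _ (by rw [pv_contains_inner]; simp [hv])]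
        show (pvInner ps n').map _ = pvInner (ps ++ [(n', verb)]) n'
        rw [pv_inner_extend_mem ps n' verb hv]
      · have hb : (n' == noun) = false := by simpa using hne
        simp only [Function.comp, hb, Bool.false_eq_true, if_neg, not_false_iff]
        rw [pv_inner_unchanged ps (noun, verb) n' hne]
    · simp only [hv, decide_false, Bool.false_eq_true, if_false]
      apply PySem.Dict.ext
      rw [PySem.Dict.items_insert_of_contains _ _ (by rw [pv_contains_dictOf]; simp [hn])]
      show ((PySem.Set.ofList (ps.map (·.1))).map (fun n' => (n', PySem.Dict.mk (pvInner ps n')))).map _ = _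
      show _ = (PySem.Set.ofList ((ps ++ [(noun, verb)]).map (·.1))).map
        (fun n' => (n', PySem.Dict.mk (pvInner (ps ++ [(noun, verb)]) n')))
      rw [List.map_append, List.map_singleton, PySem.Set.ofList_append_singleton,
          PySem.Set.add_of_mem (by rwa [PySem.Set.mem_ofList]), List.map_map]
      apply List.map_congr_left
      intro n' hn'
      by_cases hne : n' = noun
      · subst hne
        simp only [Function.comp, beq_self_eq_true, if_pos]
        refine congrArg _ ?_
        apply PySem.Dict.ext
        rw [PySem.Dict.items_insert_of_not_contains _ _ (by rw [pv_contains_inner]; simp [hv])]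
        show pvInner ps n' ++ [(verb, 1)] = pvInner (ps ++ [(n', verb)]) n'
        rw [pv_inner_extend_new ps n' verb hv]
      · have hb : (n' == noun) = false := by simpa using hne
        simp only [Function.comp, hb, Bool.false_eq_true, if_neg, not_false_iff]
        rw [pv_inner_unchanged ps (noun, verb) n' hne]
  · simp only [hn, decide_false, Bool.false_eq_true, if_false]
    rw [PySem.Dict.getD_insert_self]
    have hce : (PySem.Dict.empty : PySem.Dict String Int).contains verb = false := PySem.Dict.contains_empty _
    rw [hce]
    simp only [Bool.false_eq_true, if_false]
    rw [PySem.Dict.insert_insert_self]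
    apply PySem.Dict.ext
    rw [PySem.Dict.items_insert_of_not_contains _ _ (by rw [pv_contains_dictOf]; simp [hn])]
    show ((PySem.Set.ofList (ps.map (·.1))).map (fun n' => (n', PySem.Dict.mk (pvInner ps n')))) ++ _ = _
    show _ = (PySem.Set.ofList ((ps ++ [(noun, verb)]).map (·.1))).map
      (fun n' => (n', PySem.Dict.mk (pvInner (ps ++ [(noun, verb)]) n')))
    rw [List.map_append, List.map_singleton, PySem.Set.ofList_append_singleton,
        PySem.Set.add_of_not_mem (by rwa [PySem.Set.mem_ofList]), List.map_append, List.map_singleton]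
    congr 1
    · apply List.map_congr_left
      intro n' hn'
      have hne : n' ≠ noun := by
        intro he; exact hn (he ▸ (PySem.Set.mem_ofList _ _).mp hn')
      rw [pv_inner_unchanged ps (noun, verb) n' hne]
    · have hv : verb ∉ (ps.filter (fun q => q.1 == noun)).map (·.2) := by
        rw [pv_filter_fresh ps noun hn]; simp
      rw [pv_inner_extend_new ps noun verb hv, pv_inner_nil_of_fresh ps noun hn]
      refine congrArg (fun d => [((noun : String), d)]) ?_
      apply PySem.Dict.ext
      rw [PySem.Dict.items_insert_of_not_contains _ _ (PySem.Dict.contains_empty _)]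
      rfl

def pvStepB (r : PySem.Dict String (PySem.Dict String Int)) (q : (String × String) × Int) : PySem.Dict String (PySem.Dict String Int) :=
  (r.setdefault q.1.1 PySem.Dict.empty).insert q.1.1
    (((r.setdefault q.1.1 PySem.Dict.empty).getD q.1.1 PySem.Dict.empty).insert q.1.2 q.2)

def pvRG (its : List ((String × String) × Int)) (noun : String) : List (String × Int) :=
  (its.filter (fun q => q.1.1 == noun)).map (fun q => (q.1.2, q.2))

def pvRegroupSpec (its : List ((String × String) × Int)) : PySem.Dict String (PySem.Dict String Int) :=
  PySem.Dict.mk ((PySem.Set.ofList (its.map (·.1.1))).map (fun noun => (noun, PySem.Dict.mk (pvRG its noun))))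

lemma pv_keys_rg (its : List ((String × String) × Int)) :
    (pvRegroupSpec its).keys = PySem.Set.ofList (its.map (·.1.1)) := by
  simp only [pvRegroupSpec, PySem.Dict.keys_mk, List.map_map]
  exact List.map_id' _

lemma pv_contains_rg (its : List ((String × String) × Int)) (n : String) :
    (pvRegroupSpec its).contains n = decide (n ∈ its.map (·.1.1)) := by
  rw [PySem.Dict.contains_eq_decide_mem_keys, pv_keys_rg]
  simp [PySem.Set.mem_ofList]

lemma pv_getD_rg (its : List ((String × String) × Int)) (n : String) (h : n ∈ its.map (·.1.1)) :
    (pvRegroupSpec its).getD n PySem.Dict.empty = PySem.Dict.mk (pvRG its n) := by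
  apply PySem.Dict.getD_of_mem_items
  · show (n, PySem.Dict.mk (pvRG its n)) ∈ (PySem.Set.ofList (its.map (·.1.1))).map _
    exact List.mem_map_of_mem ((PySem.Set.mem_ofList _ _).mpr h)
  · rw [pv_keys_rg]; exact PySem.Set.nodup_ofList _

lemma pv_rg_unchanged (its : List ((String × String) × Int)) (q : (String × String) × Int)
    (n : String) (h : n ≠ q.1.1) : pvRG (its ++ [q]) n = pvRG its n := by
  unfold pvRG
  rw [List.filter_append]
  simp [List.filter_singleton, Ne.symm h]

lemma pv_rg_extend (its : List ((String × String) × Int)) (q : (String × String) × Int) :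
    pvRG (its ++ [q]) q.1.1 = pvRG its q.1.1 ++ [(q.1.2, q.2)] := by
  unfold pvRG
  rw [List.filter_append]
  simp [List.filter_singleton]

lemma pv_rg_fresh (its : List ((String × String) × Int)) (n : String)
    (h : n ∉ its.map (·.1.1)) : pvRG its n = [] := by
  unfold pvRG
  rw [List.filter_eq_nil_iff.mpr, List.map_nil]
  intro x hx hb
  exact h (List.mem_map.mpr ⟨x, hx, by simpa using hb⟩)

lemma pv_inner_not_contains (its : List ((String × String) × Int)) (q : (String × String) × Int)
    (hq : q.1 ∉ its.map (·.1)) :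
    (PySem.Dict.mk (pvRG its q.1.1)).contains q.1.2 = false := by
  rw [PySem.Dict.contains_mk]
  rw [List.any_eq_false]
  intro r hr
  simp only [pvRG, List.mem_map, List.mem_filter] at hr
  obtain ⟨x, ⟨hx, hx1⟩, hxr⟩ := hr
  subst hxr
  simp only [beq_eq_false_iff_ne, ne_eq]
  intro he
  have h2 : x.1.2 = q.1.2 := by simpa using he
  have h1 : x.1.1 = q.1.1 := by simpa using hx1
  exact hq (List.mem_map.mpr ⟨x, hx, Prod.ext h1 h2⟩)

lemma pvStepB_rg (its : List ((String × String) × Int)) (q : (String × String) × Int)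
    (hq : q.1 ∉ its.map (·.1)) :
    pvStepB (pvRegroupSpec its) q = pvRegroupSpec (its ++ [q]) := by
  unfold pvStepB
  by_cases hn : q.1.1 ∈ its.map (·.1.1)
  · rw [PySem.Dict.setdefault_of_contains _ _ (by rw [pv_contains_rg]; simp [hn])]
    rw [pv_getD_rg its q.1.1 hn]
    apply PySem.Dict.ext
    rw [PySem.Dict.items_insert_of_contains _ _ (by rw [pv_contains_rg]; simp [hn])]
    show ((PySem.Set.ofList (its.map (·.1.1))).map (fun n' => (n', PySem.Dict.mk (pvRG its n')))).map _ = _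
    show _ = (PySem.Set.ofList ((its ++ [q]).map (·.1.1))).map
      (fun n' => (n', PySem.Dict.mk (pvRG (its ++ [q]) n')))
    rw [List.map_append, List.map_singleton, PySem.Set.ofList_append_singleton,
        PySem.Set.add_of_mem (by rwa [PySem.Set.mem_ofList]), List.map_map]
    apply List.map_congr_left
    intro n' hn'
    by_cases hne : n' = q.1.1
    · subst hne
      simp only [Function.comp, beq_self_eq_true, if_pos]
      refine congrArg _ ?_
      apply PySem.Dict.ext
      rw [PySem.Dict.items_insert_of_not_contains _ _ (pv_inner_not_contains its q hq)]
      show pvRG its q.1.1 ++ [(q.1.2, q.2)] = pvRG (its ++ [q]) q.1.1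
      rw [pv_rg_extend]
    · have hb : (n' == q.1.1) = false := by simpa using hne
      simp only [Function.comp, hb, Bool.false_eq_true, if_neg, not_false_iff]
      rw [pv_rg_unchanged its q n' hne]
  · rw [PySem.Dict.setdefault_of_not_contains _ _ (by rw [pv_contains_rg]; simp [hn])]
    rw [PySem.Dict.getD_insert_self, PySem.Dict.insert_insert_self]
    apply PySem.Dict.ext
    rw [PySem.Dict.items_insert_of_not_contains _ _ (by rw [pv_contains_rg]; simp [hn])]
    show ((PySem.Set.ofList (its.map (·.1.1))).map (fun n' => (n', PySem.Dict.mk (pvRG its n')))) ++ _ = _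
    show _ = (PySem.Set.ofList ((its ++ [q]).map (·.1.1))).map
      (fun n' => (n', PySem.Dict.mk (pvRG (its ++ [q]) n')))
    rw [List.map_append, List.map_singleton, PySem.Set.ofList_append_singleton,
        PySem.Set.add_of_not_mem (by rwa [PySem.Set.mem_ofList]), List.map_append, List.map_singleton]
    congr 1
    · apply List.map_congr_left
      intro n' hn'
      have hne : n' ≠ q.1.1 := by
        intro he; exact hn (he ▸ (PySem.Set.mem_ofList _ _).mp hn')
      rw [pv_rg_unchanged its q n' hne]
    · rw [pv_rg_extend, pv_rg_fresh its q.1.1 hn]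
      refine congrArg (fun d => [((q.1.1 : String), d)]) ?_
      apply PySem.Dict.ext
      rw [PySem.Dict.items_insert_of_not_contains _ _ (PySem.Dict.contains_empty _)]
      rfl

lemma pvFoldA (ps : List (String × String)) :
    ps.foldl pvStepA PySem.Dict.empty = pvDictOf ps := by
  induction ps using List.reverseRecOn with
  | nil => rfl
  | append_singleton ps p ih =>
    rw [List.foldl_append, List.foldl_cons, List.foldl_nil, ih, pvStepA_dictOf]

lemma pvFoldB (its : List ((String × String) × Int)) (h : (its.map (·.1)).Nodup) :
    its.foldl pvStepB PySem.Dict.empty = pvRegroupSpec its := by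
  induction its using List.reverseRecOn with
  | nil => rfl
  | append_singleton its q ih =>
    rw [List.map_append, List.map_singleton] at h
    have h1 := (List.nodup_append.mp h).1
    have h2 : q.1 ∉ its.map (·.1) := by
      intro hm
      exact (List.disjoint_of_nodup_append h) hm (List.mem_singleton_self q.1)
    rw [List.foldl_append, List.foldl_cons, List.foldl_nil, ih h1, pvStepB_rg its q h2]

lemma pv_rg_counter (ps : List (String × String)) (n : String) :
    pvRG ((PySem.Set.ofList ps).map (fun k => (k, (ps.count k : Int)))) n = pvInner ps n := by
  unfold pvRG pvInner
  rw [List.filter_map, List.map_map]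
  show ((PySem.Set.ofList ps).filter (fun k => k.1 == n)).map (fun k => (k.2, (ps.count k : Int))) = _
  rw [pv_filter_ofList]
  have hself : (ps.filter (fun q => q.1 == n)).map (fun q => ((n : String), q.2))
      = ps.filter (fun q => q.1 == n) := by
    have hpt : ∀ x ∈ ps.filter (fun q => q.1 == n), ((n : String), x.2) = (fun x => x) x := by
      intro x hx
      exact Prod.ext (by symm; simpa using (List.mem_filter.mp hx).2) rfl
    rw [List.map_congr_left hpt, List.map_id']
  have hmm : ps.filter (fun q => q.1 == n)
      = ((ps.filter (fun q => q.1 == n)).map (·.2)).map (fun v => ((n : String), v)) := by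
    rw [List.map_map]
    exact hself.symm
  conv_lhs => rw [hmm]
  rw [pv_map_ofList _ (fun a b hab => by simpa using congrArg Prod.snd hab), List.map_map]
  rfl

lemma pvRegroupSpec_counter (ps : List (String × String)) :
    pvRegroupSpec ((PySem.Set.ofList ps).map (fun k => (k, (ps.count k : Int)))) = pvDictOf ps := by
  unfold pvRegroupSpec pvDictOf
  apply PySem.Dict.ext
  show (PySem.Set.ofList (((PySem.Set.ofList ps).map (fun k => (k, (ps.count k : Int)))).map (·.1.1))).map _
    = (PySem.Set.ofList (ps.map (·.1))).map _
  rw [List.map_map]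
  show (PySem.Set.ofList ((PySem.Set.ofList ps).map (·.1))).map _ = _
  rw [pv_ofList_map_ofList]
  apply List.map_congr_left
  intro n _
  exact congrArg _ (congrArg _ (pv_rg_counter ps n))

lemma pvFoldRange {σ : Type} (verbs nouns : List String) (h : verbs.length ≤ nouns.length)
    (f : σ → (String × String) → σ) (init : σ) :
    (PySem.List.pyRange 0 (PySem.List.len verbs)).foldl
      (fun s i => f s (PySem.List.pyGetD nouns i "", PySem.List.pyGetD verbs i "")) init
    = (nouns.zip verbs).foldl f init := by
  rw [← pvPairs verbs nouns h, List.foldl_map]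

theorem pvMain (verbs nouns : List String) (hpre : verbs.length ≤ nouns.length) :
    verbs_per_noun verbs nouns = verbs_per_noun_alt verbs nouns := by
  have hA : verbs_per_noun verbs nouns
      = (pvDictOf (nouns.zip verbs)).items.map (fun p => (p.1, p.2.items)) := by
    show (((PySem.List.pyRange 0 (PySem.List.len verbs)).foldl
        (fun hist i => pvStepA hist (PySem.List.pyGetD nouns i "", PySem.List.pyGetD verbs i ""))
        PySem.Dict.empty).items.map (fun p => (p.1, p.2.items))) = _
    rw [pvFoldRange verbs nouns hpre pvStepA, pvFoldA]
  have hcnt : (PySem.List.pyRange 0 (PySem.List.len verbs)).foldl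
      (fun (d : PySem.Dict (String × String) Int) i =>
        let key := (PySem.List.pyGetD nouns i "", PySem.List.pyGetD verbs i "")
        d.insert key (d.getD key 0 + 1)) PySem.Dict.empty
      = PySem.Dict.counter (nouns.zip verbs) := by
    show (PySem.List.pyRange 0 (PySem.List.len verbs)).foldl
      (fun (d : PySem.Dict (String × String) Int) i =>
        (fun d k => PySem.Dict.insert d k (d.getD k 0 + 1)) d
          (PySem.List.pyGetD nouns i "", PySem.List.pyGetD verbs i "")) PySem.Dict.empty = _
    rw [pvFoldRange verbs nouns hpre (fun d k => PySem.Dict.insert d k (d.getD k 0 + 1))]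
    exact PySem.Dict.foldl_insert_getD_add_one_eq_counter _
  have hB : verbs_per_noun_alt verbs nouns
      = (pvDictOf (nouns.zip verbs)).items.map (fun p => (p.1, p.2.items)) := by
    show (((PySem.List.pyRange 0 (PySem.List.len verbs)).foldl
        (fun (d : PySem.Dict (String × String) Int) i =>
          let key := (PySem.List.pyGetD nouns i "", PySem.List.pyGetD verbs i "")
          d.insert key (d.getD key 0 + 1)) PySem.Dict.empty).items.foldl pvStepB
        PySem.Dict.empty).items.map (fun p => (p.1, p.2.items)) = _
    rw [hcnt, PySem.Dict.items_counter]
    have hnd : ((((PySem.Set.ofList (nouns.zip verbs)).map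
        (fun k => (k, ((nouns.zip verbs).count k : Int))))).map (·.1)).Nodup := by
      rw [List.map_map]
      have : ((fun x => x.1) ∘ fun k => (k, ((nouns.zip verbs).count k : Int))) = fun x => x := rfl
      rw [this, List.map_id']
      exact PySem.Set.nodup_ofList _
    rw [pvFoldB _ hnd, pvRegroupSpec_counter]
  rw [hA, hB]

-- ===== VERDICT (by name: the statement is the Claim_ definition above) =====
theorem verbs_per_noun_spec : Claim_equal_verbs_per_noun := by
  intro verbs nouns _ hpre
  unfold Spec_verbs_per_noun
  exact pvMain verbs nouns hpre
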